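-- pv_equiv track=rewrite | github.com/smyu24/AGSWkstGenerator | app/logic/prealgebra/prepart2.py | overlapping_var
-- ===== SOURCE A (Python) =====
-- def overlapping_var(first, second):
--     answer = ""
--     taken_1 = ""
--     taken_2 = ""
--     for i in range(len(first)):
--         for t in range(len(second)):
--             taken_1 = first[i]
--             taken_2 = second[t]
--             if taken_1[:1] == taken_2[:1]:
--                 if taken_1[1:2] == '^' and taken_2[1:2] == '^':
--                     if taken_1[2:] >= taken_2[2:]:
--                         answer = answer + str(taken_2)
--                     else:
--                         answer = answer + str(taken_1)
--                 else:
--                     answer = answer + str(taken_1[:1])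
--     if answer != 'None':
--         return(answer)
--     else:
--         return('')
-- ===== SOURCE B (Python) =====
-- def overlapping_var(first, second):
--     groups = {}
--     for s in second:
--         k = s[:1]
--         groups[k] = groups.get(k, []) + [s]
--     parts = []
--     for f in first:
--         for s in groups.get(f[:1], []):
--             if f[1:2] == '^' and s[1:2] == '^':
--                 parts.append(s if f[2:] >= s[2:] else f)
--             else:
--                 parts.append(f[:1])
--     answer = ''.join(parts)
--     return answer if answer != 'None' else ''
-- ===== Notes on version B (the rewrite author's own statement) =====
-- stated objective: faster
-- what changed: B builds a dict grouping the strings of `second` by their first character in one pass, then each element of `first` visits only its matching partners (collected via a parts list joined once), instead of A's nested scan of every (first, second) pair with repeated string concatenation.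
import Mathlib
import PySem

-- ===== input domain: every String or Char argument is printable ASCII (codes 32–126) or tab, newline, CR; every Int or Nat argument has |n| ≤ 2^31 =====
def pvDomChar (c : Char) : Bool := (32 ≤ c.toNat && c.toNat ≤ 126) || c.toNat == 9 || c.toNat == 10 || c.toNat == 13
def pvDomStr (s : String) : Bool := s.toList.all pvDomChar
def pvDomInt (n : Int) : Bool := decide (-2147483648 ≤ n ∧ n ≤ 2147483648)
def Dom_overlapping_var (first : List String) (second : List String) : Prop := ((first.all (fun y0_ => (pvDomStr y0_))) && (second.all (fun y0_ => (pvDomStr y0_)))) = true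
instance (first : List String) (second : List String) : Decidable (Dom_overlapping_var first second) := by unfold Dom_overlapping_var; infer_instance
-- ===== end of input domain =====

-- B groups the `second` strings by first character in a dict built once, so each element of `first`
-- scans only its matching partners instead of all of `second` (asymptotically fewer pairs examined).

-- ===== PORT A =====
-- A's nested loops: for each first[i], scan ALL of second, appending to the answer string.
def overlapping_var (first : List String) (second : List String) : String :=
  let answer : List Char :=
    first.foldl (fun answer t1 =>
      second.foldl (fun answer t2 =>
        let taken_1 := t1.toList
        let taken_2 := t2.toList
        if PySem.List.slice taken_1 none (some 1) = PySem.List.slice taken_2 none (some 1) then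
          if PySem.List.slice taken_1 (some 1) (some 2) = ['^'] ∧
             PySem.List.slice taken_2 (some 1) (some 2) = ['^'] then
            if PySem.List.slice taken_2 (some 2) none ≤ PySem.List.slice taken_1 (some 2) none then
              answer ++ taken_2
            else
              answer ++ taken_1
          else
            answer ++ PySem.List.slice taken_1 none (some 1)
        else answer) answer) []
  if answer = ['N', 'o', 'n', 'e'] then "" else String.ofList answer

-- ===== PORT B =====
-- B: one grouping pass over `second`, then each f in `first` visits only partners with the same first char.
def overlapping_var_alt (first : List String) (second : List String) : String :=
  let groups : PySem.Dict (List Char) (List (List Char)) :=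
    second.foldl (fun d s =>
      let k := PySem.List.slice s.toList none (some 1)
      d.modify k [] (· ++ [s.toList])) PySem.Dict.empty
  let parts : List (List Char) :=
    first.foldl (fun parts f =>
      let fc := f.toList
      (groups.getD (PySem.List.slice fc none (some 1)) []).foldl (fun parts s =>
        parts ++
          [if PySem.List.slice fc (some 1) (some 2) = ['^'] ∧
              PySem.List.slice s (some 1) (some 2) = ['^'] then
             if PySem.List.slice s (some 2) none ≤ PySem.List.slice fc (some 2) none then s else fc
           else PySem.List.slice fc none (some 1)]) parts) []
  let answer : List Char := PySem.Chars.join [] parts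
  if answer = ['N', 'o', 'n', 'e'] then "" else String.ofList answer

-- ===== PRECONDITION & SPEC =====
def Spec_overlapping_var (first : List String) (second : List String) (out : String) : Prop := out = overlapping_var_alt first second
instance (first : List String) (second : List String) (out : String) : Decidable (Spec_overlapping_var first second out) := by unfold Spec_overlapping_var; infer_instance

-- ===== CLAIM (what is proved, stated in full; the proofs are below) =====
def Claim_equal_overlapping_var : Prop := ∀ (first : List String) (second : List String), Dom_overlapping_var first second → Spec_overlapping_var first second (overlapping_var first second)

-- ===== LEMMAS AND PROOFS =====

-- helper abbreviations used only by the proofs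
def pvKey (cs : List Char) : List Char := PySem.List.slice cs none (some 1)

def pvVal (fc s : List Char) : List Char :=
  if PySem.List.slice fc (some 1) (some 2) = ['^'] ∧ PySem.List.slice s (some 1) (some 2) = ['^'] then
    if PySem.List.slice s (some 2) none ≤ PySem.List.slice fc (some 2) none then s else fc
  else pvKey fc

def pvChunk (fc s : List Char) : List Char :=
  if pvKey fc = pvKey s then pvVal fc s else []

-- general: flatten distributes over flatMap
lemma pv_flatten_flatMap {α : Type} (l : List α) (g : α → List (List Char)) :
    (l.flatMap g).flatten = l.flatMap (fun x => (g x).flatten) := by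
  induction l with
  | nil => simp
  | cons h t ih => simp [List.flatMap_cons, ih]

-- general: a guarded flatMap is a flatMap over the filtered list
lemma pv_flatMap_if {α : Type} (p : α → Prop) [DecidablePred p] (v : α → List Char) (l : List α) :
    l.flatMap (fun x => if p x then v x else []) = (l.filter (fun x => decide (p x))).flatMap v := by
  induction l with
  | nil => simp
  | cons h t ih => by_cases hp : p h <;> simp [hp, ih]

-- join with empty separator is flatten
lemma pv_join_nil (ps : List (List Char)) : PySem.Chars.join [] ps = ps.flatten := by
  simp only [PySem.Chars.join, List.intercalate]
  induction ps with
  | nil => simp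
  | cons h t ih => cases t <;> simp_all [List.intersperse]

-- A's accumulated answer, characterised
lemma pv_answerA (first second : List String) :
    first.foldl (fun answer t1 =>
      second.foldl (fun answer t2 =>
        let taken_1 := t1.toList
        let taken_2 := t2.toList
        if PySem.List.slice taken_1 none (some 1) = PySem.List.slice taken_2 none (some 1) then
          if PySem.List.slice taken_1 (some 1) (some 2) = ['^'] ∧
             PySem.List.slice taken_2 (some 1) (some 2) = ['^'] then
            if PySem.List.slice taken_2 (some 2) none ≤ PySem.List.slice taken_1 (some 2) none then
              answer ++ taken_2
            else
              answer ++ taken_1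
          else
            answer ++ PySem.List.slice taken_1 none (some 1)
        else answer) answer) []
    = first.flatMap (fun t1 => second.flatMap (fun t2 => pvChunk t1.toList t2.toList)) := by
  have hin : ∀ (t1 : String),
      (fun (answer : List Char) (t2 : String) =>
        let taken_1 := t1.toList
        let taken_2 := t2.toList
        if PySem.List.slice taken_1 none (some 1) = PySem.List.slice taken_2 none (some 1) then
          if PySem.List.slice taken_1 (some 1) (some 2) = ['^'] ∧
             PySem.List.slice taken_2 (some 1) (some 2) = ['^'] then
            if PySem.List.slice taken_2 (some 2) none ≤ PySem.List.slice taken_1 (some 2) none then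
              answer ++ taken_2
            else
              answer ++ taken_1
          else
            answer ++ PySem.List.slice taken_1 none (some 1)
        else answer)
      = fun answer t2 => answer ++ pvChunk t1.toList t2.toList := by
    intro t1
    funext answer t2
    simp only [pvChunk, pvVal, pvKey]
    split_ifs <;> simp
  have hout : (fun (answer : List Char) (t1 : String) =>
      second.foldl (fun answer t2 => answer ++ pvChunk t1.toList t2.toList) answer)
      = fun answer t1 => answer ++ second.flatMap (fun t2 => pvChunk t1.toList t2.toList) := by
    funext answer t1
    exact PySem.List.foldl_append_eq_flatMap ..
  rw [show (fun (answer : List Char) (t1 : String) =>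
      second.foldl (fun answer t2 =>
        let taken_1 := t1.toList
        let taken_2 := t2.toList
        if PySem.List.slice taken_1 none (some 1) = PySem.List.slice taken_2 none (some 1) then
          if PySem.List.slice taken_1 (some 1) (some 2) = ['^'] ∧
             PySem.List.slice taken_2 (some 1) (some 2) = ['^'] then
            if PySem.List.slice taken_2 (some 2) none ≤ PySem.List.slice taken_1 (some 2) none then
              answer ++ taken_2
            else
              answer ++ taken_1
          else
            answer ++ PySem.List.slice taken_1 none (some 1)
        else answer) answer)
      = fun answer t1 => answer ++ second.flatMap (fun t2 => pvChunk t1.toList t2.toList) from by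
    funext answer t1
    rw [hin t1]
    exact PySem.List.foldl_append_eq_flatMap ..]
  rw [PySem.List.foldl_append_eq_flatMap]
  simp

-- B's groups dict, characterised: lookup = the matching sublist of `second`, in order
lemma pv_groups (second : List String) (c : List Char) :
    (second.foldl (fun d s =>
        let k := PySem.List.slice s.toList none (some 1)
        d.modify k [] (· ++ [s.toList])) PySem.Dict.empty).getD c []
    = ((second.filter (fun s => pvKey s.toList == c)).map String.toList) := by
  have h : second.foldl (fun d s =>
        let k := PySem.List.slice s.toList none (some 1)
        d.modify k [] (· ++ [s.toList])) PySem.Dict.empty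
      = (second.map (fun s => (pvKey s.toList, s.toList))).foldl
          (fun d p => d.modify p.1 [] (· ++ [p.2])) PySem.Dict.empty := by
    rw [List.foldl_map]
    rfl
  rw [h, PySem.Dict.getD_foldl_modify_append, List.filter_map, List.map_map]
  simp [Function.comp_def, pvKey]

-- B's parts list, characterised
lemma pv_parts (first second : List String) :
    first.foldl (fun parts f =>
      let fc := f.toList
      (((second.foldl (fun d s =>
          let k := PySem.List.slice s.toList none (some 1)
          d.modify k [] (· ++ [s.toList])) PySem.Dict.empty).getD
            (PySem.List.slice fc none (some 1)) [])).foldl (fun parts s =>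
        parts ++
          [if PySem.List.slice fc (some 1) (some 2) = ['^'] ∧
              PySem.List.slice s (some 1) (some 2) = ['^'] then
             if PySem.List.slice s (some 2) none ≤ PySem.List.slice fc (some 2) none then s else fc
           else PySem.List.slice fc none (some 1)]) parts) []
    = first.flatMap (fun f =>
        ((second.filter (fun s => pvKey s.toList == pvKey f.toList)).map String.toList).map
          (pvVal f.toList)) := by
  have hstep : (fun (parts : List (List Char)) (f : String) =>
      let fc := f.toList
      (((second.foldl (fun d s =>
          let k := PySem.List.slice s.toList none (some 1)
          d.modify k [] (· ++ [s.toList])) PySem.Dict.empty).getD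
            (PySem.List.slice fc none (some 1)) [])).foldl (fun parts s =>
        parts ++
          [if PySem.List.slice fc (some 1) (some 2) = ['^'] ∧
              PySem.List.slice s (some 1) (some 2) = ['^'] then
             if PySem.List.slice s (some 2) none ≤ PySem.List.slice fc (some 2) none then s else fc
           else PySem.List.slice fc none (some 1)]) parts)
      = fun parts f => parts ++
          ((second.filter (fun s => pvKey s.toList == pvKey f.toList)).map String.toList).map
            (pvVal f.toList) := by
    funext parts f
    show (((second.foldl _ PySem.Dict.empty).getD (PySem.List.slice f.toList none (some 1)) [])).foldl _ parts = _
    rw [pv_groups second]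
    rw [PySem.List.foldl_append_singleton_eq_map]
    rfl
  rw [hstep, PySem.List.foldl_append_eq_flatMap]
  simp

-- the two characterisations agree
lemma pv_core (first second : List String) :
    overlapping_var first second = overlapping_var_alt first second := by
  simp only [overlapping_var, overlapping_var_alt]
  rw [pv_answerA, pv_parts, pv_join_nil, pv_flatten_flatMap]
  have hf : ∀ (f : String),
      second.flatMap (fun t2 => pvChunk f.toList t2.toList)
      = (((second.filter (fun s => pvKey s.toList == pvKey f.toList)).map String.toList).map
          (pvVal f.toList)).flatten := by
    intro f
    rw [List.map_map, ← List.flatMap_def]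
    rw [show (fun t2 : String => pvChunk f.toList t2.toList)
        = fun t2 => if pvKey f.toList = pvKey t2.toList then pvVal f.toList t2.toList else []
        from rfl]
    rw [pv_flatMap_if]
    have : (fun x : String => decide (pvKey f.toList = pvKey x.toList))
        = fun s => pvKey s.toList == pvKey f.toList := by
      funext x
      by_cases h : pvKey f.toList = pvKey x.toList
      · simp [h]
      · simp [h, Ne.symm h]
    rw [this]
    rfl
  simp only [hf]

-- ===== VERDICT (by name: the statement is the Claim_ definition above) =====
theorem overlapping_var_spec : Claim_equal_overlapping_var := by
  intro first second _
  exact (pv_core first second).symm ▸ rfl
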